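-- pv_equiv track=rewrite | github.com/shruti-parikh/elective_4_cp | 04-recursion_powersof3ton-Python/recursion_powersof3ton.py | rec
-- ===== SOURCE A (Python) =====
-- def rec(n, power=0, L = None):
-- 	if L == None:
-- 		L = []
-- 	if power == 0:
-- 		L.append(1)
-- 	if n < 1:
-- 		return None
-- 	else:
-- 		power = power + 1
-- 		next = 3 ** power
-- 		if(next > n):
-- 			return L
-- 		L.append(next)
-- 		return rec(n, power, L)
-- ===== SOURCE B (Python) =====
-- def rec(n, power=0, L=None):
--     if L is None:
--         L = []
--     if power == 0:
--         L.append(1)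
--     if n < 1:
--         return None
--     v = 3 ** (power + 1)
--     while v <= n:
--         L.append(v)
--         v *= 3
--     return L
-- ===== Notes on version B (the rewrite author's own statement) =====
-- stated objective: simpler
-- what changed: The self-recursion that recomputes 3**power with exponentiation at every step (and re-runs the function's top-level checks on each call) is replaced by a single iterative while loop that maintains the current power of 3 as a running product v *= 3.
-- intended difference: For power = -1 and n >= 1, A's recursive call re-enters with power 0 and so appends 1 twice, returning a list starting [1, 1, ...]; B lists each power of 3 once, starting [1, ...], which is the intended value. — e.g. on rec(3, -1, none): A returns some [1, 1, 3], B returns some [1, 3]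
-- outside the precondition, e.g. on rec(5, -2, None): A returns [0.3333333333333333, 1, 1, 3], B returns [0.3333333333333333, 1.0, 3.0]
import Mathlib
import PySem

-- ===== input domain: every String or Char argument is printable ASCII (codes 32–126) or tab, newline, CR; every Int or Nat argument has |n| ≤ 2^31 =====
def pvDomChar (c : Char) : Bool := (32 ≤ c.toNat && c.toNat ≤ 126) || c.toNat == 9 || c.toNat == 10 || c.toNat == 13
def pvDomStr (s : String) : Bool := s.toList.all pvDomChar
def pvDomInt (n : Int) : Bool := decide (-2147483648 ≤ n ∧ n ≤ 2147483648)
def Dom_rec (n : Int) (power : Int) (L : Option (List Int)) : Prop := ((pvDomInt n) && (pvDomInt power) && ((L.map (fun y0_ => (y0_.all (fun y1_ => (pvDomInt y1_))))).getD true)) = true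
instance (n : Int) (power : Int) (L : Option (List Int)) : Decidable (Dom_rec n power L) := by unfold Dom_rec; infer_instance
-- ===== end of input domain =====

-- B replaces A's self-recursion (which recomputes 3**power and re-runs the top-level
-- checks each call) by one while loop carrying the running power v *= 3.
-- A mutates a passed-in L; B performs the same mutation; the equivalence proved here
-- is about the RETURN value only.

-- ===== PORT A =====
-- literal transliteration of A's self-recursion; fuel only makes it total (70 is
-- never exhausted under Pre_/Dom, where the loop runs at most ~21+1 steps)
def recGo (fuel : Nat) (n : Int) (power : Int) (L : Option (List Int)) : Option (List Int) :=
  match fuel with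
  | 0 => none
  | fuel + 1 =>
    let L0 := L.getD []
    let L1 := if power == 0 then L0 ++ [1] else L0
    if n < 1 then none
    else
      let power' := power + 1
      let next := (3 : Int) ^ power'.toNat   -- 3 ** power'; exact for power' ≥ 0 (Pre_ guarantees this whenever reached)
      if next > n then some L1
      else recGo fuel n power' (some (L1 ++ [next]))

def rec (n : Int) (power : Int) (L : Option (List Int)) : Option (List Int) :=
  recGo 70 n power L

-- ===== PORT B =====
-- the while loop of Source B; fuel 70 only makes it total, never exhausted under Pre_/Dom
def recAltLoop (fuel : Nat) (n : Int) (v : Int) (L : List Int) : List Int :=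
  match fuel with
  | 0 => L
  | fuel + 1 => if v ≤ n then recAltLoop fuel n (v * 3) (L ++ [v]) else L

def rec_alt (n : Int) (power : Int) (L : Option (List Int)) : Option (List Int) :=
  let L0 := L.getD []
  let L1 := if power == 0 then L0 ++ [1] else L0
  if n < 1 then none
  else some (recAltLoop 70 n ((3 : Int) ^ (power + 1).toNat) L1)

-- ===== PRECONDITION & SPEC =====
-- Pre_ excludes power ≤ -2 with n ≥ 1: there Python's 3 ** power is a float, so A
-- returns a list containing floats, not a value of type list[int].
def Pre_rec (n : Int) (power : Int) (L : Option (List Int)) : Prop := -1 ≤ power ∨ n < 1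
instance (n : Int) (power : Int) (L : Option (List Int)) : Decidable (Pre_rec n power L) := by unfold Pre_rec; infer_instance
def pvWitness_rec : Int × Int × Option (List Int) := (10, 0, none)

-- For power = -1 and n ≥ 1, A's recursive call re-enters with power 0 and so appends 1
-- twice, returning a list starting [1, 1, ...]; B lists each power of 3 once, starting
-- [1, ...], which is the intended value.
def D_rec (n : Int) (power : Int) (L : Option (List Int)) : Prop := 1 ≤ n ∧ power = -1
instance (n : Int) (power : Int) (L : Option (List Int)) : Decidable (D_rec n power L) := by unfold D_rec; infer_instance

def Spec_rec (n : Int) (power : Int) (L : Option (List Int)) (out : Option (List Int)) : Prop := ¬ D_rec n power L → out = rec_alt n power L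
instance (n : Int) (power : Int) (L : Option (List Int)) (out : Option (List Int)) : Decidable (Spec_rec n power L out) := by unfold Spec_rec; infer_instance

def pvDiffWitness_rec : Int × Int × Option (List Int) := (3, -1, none)
def pvDiffWitnessOut_rec : (Option (List Int)) × (Option (List Int)) := (some [1, 1, 3], some [1, 3])

-- ===== CLAIM (what is proved, stated in full; the proofs are below) =====
def Claim_unchanged_rec : Prop := ∀ (n : Int) (power : Int) (L : Option (List Int)), Dom_rec n power L → Pre_rec n power L → Spec_rec n power L (rec n power L)
def Claim_changed_rec : Prop := Dom_rec (pvDiffWitness_rec.1) (pvDiffWitness_rec.2.1) (pvDiffWitness_rec.2.2) ∧ Pre_rec (pvDiffWitness_rec.1) (pvDiffWitness_rec.2.1) (pvDiffWitness_rec.2.2) ∧ D_rec (pvDiffWitness_rec.1) (pvDiffWitness_rec.2.1) (pvDiffWitness_rec.2.2) ∧ rec (pvDiffWitness_rec.1) (pvDiffWitness_rec.2.1) (pvDiffWitness_rec.2.2) = pvDiffWitnessOut_rec.1 ∧ rec_alt (pvDiffWitness_rec.1) (pvDiffWitness_rec.2.1) (pvDiffWitness_rec.2.2) = pvDiffWitnessOut_rec.2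 ∧ pvDiffWitnessOut_rec.1 ≠ pvDiffWitnessOut_rec.2
def Claim_exact_rec : Prop := ∀ (n : Int) (power : Int) (L : Option (List Int)), Dom_rec n power L → Pre_rec n power L → D_rec n power L → rec n power L ≠ rec_alt n power L

-- ===== LEMMAS AND PROOFS =====

-- one-step unfolding equations for the two loops
theorem recGo_succ (fuel : Nat) (n power : Int) (L : Option (List Int)) :
    recGo (fuel + 1) n power L =
      (if n < 1 then none
       else if (3 : Int) ^ (power + 1).toNat > n then some (if power == 0 then L.getD [] ++ [1] else L.getD [])
       else recGo fuel n (power + 1) (some ((if power == 0 then L.getD [] ++ [1] else L.getD []) ++ [(3 : Int) ^ (power + 1).toNat]))) := rfl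

theorem recAltLoop_succ (fuel : Nat) (n v : Int) (L : List Int) :
    recAltLoop (fuel + 1) n v L = if v ≤ n then recAltLoop fuel n (v * 3) (L ++ [v]) else L := rfl

-- the loop correspondence for p ≥ 1, where A's re-entry checks are no-ops
theorem recGo_eq_loop : ∀ (fuel : Nat) (n p : Int) (L : Option (List Int)),
    1 ≤ p → 1 ≤ n → n < (3 : Int) ^ (p.toNat + fuel) →
    recGo (fuel + 1) n p L = some (recAltLoop (fuel + 1) n ((3 : Int) ^ (p + 1).toNat) (L.getD [])) := by
  intro fuel
  induction fuel with
  | zero =>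
    intro n p L hp hn hlt
    have hp0 : (p == 0) = false := by simp; omega
    have htn : (p + 1).toNat = p.toNat + 1 := by omega
    rw [Nat.add_zero] at hlt
    have hgt : n < (3 : Int) ^ (p + 1).toNat := by
      rw [htn, pow_succ]
      nlinarith [pow_pos (by norm_num : (0:Int) < 3) p.toNat]
    rw [recGo_succ, recAltLoop_succ, if_neg (not_lt.mpr hn), if_pos hgt, if_neg (not_le.mpr hgt), hp0]
    simp
  | succ fuel ih =>
    intro n p L hp hn hlt
    have hp0 : (p == 0) = false := by simp; omega
    have htn2 : (p + 1 + 1).toNat = (p + 1).toNat + 1 := by omega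
    rw [recGo_succ, recAltLoop_succ, if_neg (not_lt.mpr hn), hp0]
    by_cases hle : (3 : Int) ^ (p + 1).toNat ≤ n
    · rw [if_neg (not_lt.mpr hle), if_pos hle]
      have hih := ih n (p + 1) (some ((L.getD []) ++ [(3 : Int) ^ (p + 1).toNat]))
        (by omega) hn (by
          have he : (p + 1).toNat + fuel = p.toNat + (fuel + 1) := by omega
          rw [he]; exact hlt)
      simp only [Bool.false_eq_true, if_false]
      rw [hih]
      simp only [Option.getD_some]
      rw [htn2, pow_succ]
    · rw [if_pos (lt_of_not_ge hle), if_neg hle]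
      simp

-- the power = 0 entry step
theorem recGo_zero (fuel : Nat) (n : Int) (L : Option (List Int))
    (hn : 1 ≤ n) (hlt : n < (3 : Int) ^ (1 + fuel)) :
    recGo (fuel + 2) n 0 L = some (recAltLoop (fuel + 2) n 3 (L.getD [] ++ [1])) := by
  rw [show fuel + 2 = (fuel + 1) + 1 from rfl, recGo_succ, recAltLoop_succ, if_neg (not_lt.mpr hn)]
  have h31 : (3 : Int) ^ ((0 : Int) + 1).toNat = 3 := by norm_num
  rw [h31]
  by_cases h3 : (3 : Int) ≤ n
  · rw [if_neg (not_lt.mpr h3), if_pos h3]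
    have hloop := recGo_eq_loop fuel n 1 (some ((if ((0:Int) == 0) = true then L.getD [] ++ [1] else L.getD []) ++ [3]))
      le_rfl hn (by simpa using hlt)
    rw [show (0:Int) + 1 = 1 from rfl, hloop]
    norm_num
    rw [show (3:Int) ^ Int.toNat 2 = 9 from by decide]
  · rw [if_pos (lt_of_not_ge h3), if_neg h3]
    norm_num

theorem recAltLoop_append : ∀ (fuel : Nat) (n v : Int) (L : List Int),
    recAltLoop fuel n v L = L ++ recAltLoop fuel n v [] := by
  intro fuel
  induction fuel with
  | zero => intro n v L; simp [recAltLoop]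
  | succ fuel ih =>
    intro n v L
    rw [recAltLoop_succ, recAltLoop_succ]
    by_cases h : v ≤ n
    · rw [if_pos h, if_pos h, ih n (v * 3) (L ++ [v]), ih n (v * 3) ([] ++ [v])]
      simp
    · rw [if_neg h, if_neg h]; simp

theorem dom_bound (n power : Int) (L : Option (List Int)) (h : Dom_rec n power L) :
    n ≤ 2147483648 := by
  simp [Dom_rec, pvDomInt] at h
  exact h.1.1.2

-- ===== VERDICT (by name: the statement is the Claim_ definition above) =====
theorem rec_spec : Claim_unchanged_rec := by
  intro n power L hdom hpre hnd
  have hn2 : n ≤ 2147483648 := dom_bound n power L hdom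
  by_cases hn : n < 1
  · show recGo 70 n power L = rec_alt n power L
    rw [show (70 : Nat) = 69 + 1 from rfl, recGo_succ, if_pos hn]
    simp [rec_alt, hn]
  · have hn1 : 1 ≤ n := by omega
    have hpw : -1 ≤ power := by rcases hpre with h | h <;> omega
    have hne : power ≠ -1 := by
      intro h; exact hnd ⟨hn1, h⟩
    have hp0 : 0 ≤ power := by omega
    show recGo 70 n power L = rec_alt n power L
    by_cases hz : power = 0
    · subst hz
      rw [show (70 : Nat) = 68 + 2 from rfl,
        recGo_zero 68 n L hn1 (by
          have h2 : (2147483648 : Int) < 3 ^ (1 + 68) := by norm_num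
          omega)]
      simp only [rec_alt, if_neg (not_lt.mpr hn1)]
      norm_num
    · have hp1 : 1 ≤ power := by omega
      rw [show (70 : Nat) = 69 + 1 from rfl,
        recGo_eq_loop 69 n power L hp1 hn1 (by
          have h1 : (3 : Int) ^ 69 ≤ 3 ^ (power.toNat + 69) :=
            pow_le_pow_right₀ (by norm_num) (by omega)
          have h2 : (2147483648 : Int) < 3 ^ 69 := by norm_num
          omega)]
      have hz' : (power == 0) = false := by simp [hz]
      simp [rec_alt, hz', not_lt.mpr hn1]

theorem rec_changed : Claim_changed_rec := by unfold Claim_changed_rec; decide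

theorem rec_tight : Claim_exact_rec := by
  intro n power L hdom hpre hd
  obtain ⟨hn1, hpw⟩ := hd
  subst hpw
  have hn2 : n ≤ 2147483648 := dom_bound n (-1) L hdom
  have hA : rec n (-1) L = some (recAltLoop 69 n 3 (L.getD [] ++ [1] ++ [1])) := by
    show recGo 70 n (-1) L = _
    rw [show (70 : Nat) = 69 + 1 from rfl, recGo_succ, if_neg (not_lt.mpr hn1)]
    have h1 : (3 : Int) ^ ((-1 : Int) + 1).toNat = 1 := by norm_num
    rw [h1, if_neg (by omega : ¬ (1 : Int) > n)]
    have hm : ((-1 : Int) == 0) = false := by decide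
    rw [hm]
    simp only [Bool.false_eq_true, if_false]
    rw [show (-1 : Int) + 1 = 0 from rfl, show (69 : Nat) = 67 + 2 from rfl,
      recGo_zero 67 n (some (L.getD [] ++ [1])) hn1 (by
        have h2 : (2147483648 : Int) < 3 ^ (1 + 67) := by norm_num
        omega)]
    simp
  have hB : rec_alt n (-1) L = some (recAltLoop 69 n 3 (L.getD [] ++ [1])) := by
    simp only [rec_alt, if_neg (not_lt.mpr hn1)]
    have h1 : (3 : Int) ^ ((-1 : Int) + 1).toNat = 1 := by norm_num
    rw [h1, show (70 : Nat) = 69 + 1 from rfl, recAltLoop_succ, if_pos hn1]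
    have hm : ((-1 : Int) == 0) = false := by decide
    rw [hm]
    simp
  rw [hA, hB]
  intro hcontra
  have hlen := congrArg (fun o => (Option.getD o []).length) hcontra
  simp only [Option.getD_some] at hlen
  rw [recAltLoop_append 69 n 3 (L.getD [] ++ [1] ++ [1]),
    recAltLoop_append 69 n 3 (L.getD [] ++ [1])] at hlen
  simp [List.length_append] at hlen
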